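-- pv_equiv track=rewrite | github.com/chiosso/AdventOfCode_2023_Python | Day13/point_of_incidence.py | isStringSymmetrical
-- ===== SOURCE A (Python) =====
-- def isStringSymmetrical(s, reflection_index): # Line of reflection is at position after reflection_index
--     left_index = reflection_index
--     right_index = reflection_index + 1
--     while (left_index >= 0 and right_index < len(s)):
--         if (s[left_index] != s[right_index]):
--             return False
--         left_index = left_index - 1
--         right_index = right_index + 1
--     return True
-- ===== SOURCE B (Python) =====
-- def isStringSymmetrical(s, reflection_index):
--     # Compare the reversed left block to the matching right block in one slice comparison.
--     i = reflection_index + 1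
--     n = min(i, len(s) - i)
--     if n <= 0:
--         return True
--     return s[i - n:i][::-1] == s[i:i + n]
-- ===== Notes on version B (the rewrite author's own statement) =====
-- stated objective: simpler
-- what changed: Replaces A's outward two-pointer while loop with a single slice comparison: the left block closest to the reflection line, reversed, is compared wholesale to the matching right block.
import Mathlib
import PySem

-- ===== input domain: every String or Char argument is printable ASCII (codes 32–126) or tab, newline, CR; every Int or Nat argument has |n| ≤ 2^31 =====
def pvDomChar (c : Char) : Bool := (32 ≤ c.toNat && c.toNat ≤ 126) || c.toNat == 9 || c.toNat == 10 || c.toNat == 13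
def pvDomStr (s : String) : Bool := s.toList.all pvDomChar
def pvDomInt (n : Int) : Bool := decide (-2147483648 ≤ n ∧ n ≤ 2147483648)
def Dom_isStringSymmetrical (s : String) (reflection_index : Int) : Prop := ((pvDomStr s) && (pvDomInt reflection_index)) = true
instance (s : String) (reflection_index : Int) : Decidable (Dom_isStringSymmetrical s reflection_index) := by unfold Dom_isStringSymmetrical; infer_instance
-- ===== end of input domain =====

-- B replaces A's outward two-pointer scan by one slice/reverse comparison of the overlapping blocks (objective: simpler).

-- ===== PORT A =====
-- the while loop of A: two indices walking outward; the guard keeps both in range,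
-- so pyGet? (none = IndexError) always returns `some` whenever it is consulted
def pvLoopA (cs : List Char) (li ri : Int) : Bool :=
  if 0 ≤ li ∧ ri < (cs.length : Int) then
    if PySem.List.pyGet? cs li ≠ PySem.List.pyGet? cs ri then false
    else pvLoopA cs (li - 1) (ri + 1)
  else true
termination_by ((cs.length : Int) - ri).toNat
decreasing_by omega

def isStringSymmetrical (s : String) (reflection_index : Int) : Bool :=
  pvLoopA s.toList reflection_index (reflection_index + 1)

-- ===== PORT B =====
def isStringSymmetrical_alt (s : String) (reflection_index : Int) : Bool :=
  let cs := s.toList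
  let i := reflection_index + 1
  let n := min i ((cs.length : Int) - i)
  if n ≤ 0 then true
  else decide ((PySem.List.slice cs (some (i - n)) (some i)).reverse
                 = PySem.List.slice cs (some i) (some (i + n)))

-- ===== PRECONDITION & SPEC =====
def Spec_isStringSymmetrical (s : String) (reflection_index : Int) (out : Bool) : Prop := out = isStringSymmetrical_alt s reflection_index
instance (s : String) (reflection_index : Int) (out : Bool) : Decidable (Spec_isStringSymmetrical s reflection_index out) := by unfold Spec_isStringSymmetrical; infer_instance

-- ===== CLAIM (what is proved, stated in full; the proofs are below) =====
def Claim_equal_isStringSymmetrical : Prop := ∀ (s : String) (reflection_index : Int), Dom_isStringSymmetrical s reflection_index → Spec_isStringSymmetrical s reflection_index (isStringSymmetrical s reflection_index)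

-- ===== LEMMAS AND PROOFS =====

-- the loop computes exactly the block comparison, for the exact overlap m
lemma pvLoopA_eq_blocks (m : Nat) : ∀ (cs : List Char) (l r : Nat), l < cs.length →
    m = min (l + 1) (cs.length - r) →
    pvLoopA cs (l : Int) (r : Int)
      = decide (((cs.drop (l + 1 - m)).take m).reverse = (cs.drop r).take m) := by
  induction m with
  | zero =>
    intro cs l r hl hm
    rw [pvLoopA]
    have : ¬ ((r : Int) < (cs.length : Int)) := by omega
    simp [this]
  | succ k ih =>
    intro cs l r hl hm
    have hr : r < cs.length := by omega
    have hk : k ≤ l := by omega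
    rw [pvLoopA]
    have hguard : 0 ≤ (l : Int) ∧ (r : Int) < (cs.length : Int) := by
      constructor <;> omega
    rw [if_pos hguard]
    have hgl : PySem.List.pyGet? cs (l : Int) = some cs[l] := by
      simp [PySem.List.pyGet?_natCast, List.getElem?_eq_getElem hl]
    have hgr : PySem.List.pyGet? cs (r : Int) = some cs[r] := by
      simp [PySem.List.pyGet?_natCast, List.getElem?_eq_getElem hr]
    -- decompose the two blocks
    have hleft : (cs.drop (l + 1 - (k + 1))).take (k + 1)
        = (cs.drop (l - k)).take k ++ [cs[l]] := by
      have h1 : l + 1 - (k + 1) = l - k := by omega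
      rw [h1, List.take_add_one]
      have : (cs.drop (l - k))[k]? = some cs[l] := by
        rw [List.getElem?_drop]
        have : l - k + k = l := by omega
        rw [this, List.getElem?_eq_getElem hl]
      simp [this]
    have hright : (cs.drop r).take (k + 1) = cs[r] :: (cs.drop (r + 1)).take k := by
      rw [List.drop_eq_getElem_cons hr]
      rfl
    by_cases hc : cs[l] = cs[r]
    · rw [if_neg (by simp [hgl, hgr, hc])]
      by_cases hl0 : l = 0
      · -- left pointer falls off: k = 0, both tails empty
        have hk0 : k = 0 := by omega
        subst hl0; subst hk0
        rw [pvLoopA, if_neg (by norm_num), hleft, hright]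
        simp [hc]
      · have hcast : ((l : Int) - 1) = ((l - 1 : Nat) : Int) := by omega
        have hcast2 : ((r : Int) + 1) = ((r + 1 : Nat) : Int) := by omega
        rw [hcast, hcast2, ih cs (l - 1) (r + 1) (by omega) (by omega)]
        have h2 : l - 1 + 1 - k = l - k := by omega
        rw [h2, hleft, hright]
        simp [hc]
    · rw [if_pos (by simp [hgl, hgr, hc])]
      rw [hleft, hright]
      simp only [List.reverse_append, List.reverse_cons, List.reverse_nil,
        List.nil_append, List.cons_append, List.cons.injEq]
      simp [hc]

-- ===== VERDICT (by name: the statement is the Claim_ definition above) =====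
theorem isStringSymmetrical_spec : Claim_equal_isStringSymmetrical := by
  intro s ri _
  unfold Spec_isStringSymmetrical isStringSymmetrical isStringSymmetrical_alt
  set cs := s.toList with hcs
  by_cases h1 : ri < 0
  · rw [pvLoopA, if_neg (by omega)]
    rw [if_pos (by omega)]
  · by_cases h2 : (cs.length : Int) ≤ ri + 1
    · rw [pvLoopA, if_neg (by omega)]
      rw [if_pos (by omega)]
    · obtain ⟨l, rfl⟩ : ∃ l : Nat, ri = (l : Int) := ⟨ri.toNat, by omega⟩
      set m := min (l + 1) (cs.length - (l + 1)) with hmdef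
      set n := min ((l : Int) + 1) ((cs.length : Int) - ((l : Int) + 1)) with hndef
      have hnm : n = (m : Int) := by omega
      rw [if_neg (by omega)]
      have hA : pvLoopA cs (l : Int) ((l : Int) + 1)
          = decide (((cs.drop (l + 1 - m)).take m).reverse = (cs.drop (l + 1)).take m) := by
        have := pvLoopA_eq_blocks m cs l (l + 1) (by omega) rfl
        rwa [show ((l + 1 : Nat) : Int) = (l : Int) + 1 from by push_cast; ring] at this
      rw [hA]
      have eL : PySem.List.slice cs (some ((l : Int) + 1 - n)) (some ((l : Int) + 1))
          = (cs.drop (l + 1 - m)).take m := by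
        rw [show (l : Int) + 1 - n = ((l + 1 - m : Nat) : Int) from by omega,
            show (l : Int) + 1 = ((l + 1 : Nat) : Int) from by push_cast; ring,
            PySem.List.slice_natCast]
        congr 1
        omega
      have eR : PySem.List.slice cs (some ((l : Int) + 1)) (some ((l : Int) + 1 + n))
          = (cs.drop (l + 1)).take m := by
        rw [show (l : Int) + 1 + n = ((l + 1 + m : Nat) : Int) from by omega,
            show (l : Int) + 1 = ((l + 1 : Nat) : Int) from by push_cast; ring,
            PySem.List.slice_natCast]
        congr 1
        omega
      rw [eL, eR]
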